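-- pv_equiv track=rewrite | github.com/giruda-gear/algorithms-and-patterns | solutions/delivery_message.py | delivery_message
-- ===== SOURCE A (Python) =====
-- from typing import List
--
-- def delivery_message(timestamps: List[int], messages: List[str], k: int) -> List[bool]:
--     result: List[bool] = []
--     last_delivered: dict[str, int] = {}
--
--     for i in range(len(timestamps)):
--         timestamp = timestamps[i]
--         message = messages[i]
--
--         if message in last_delivered and timestamp - last_delivered[message] < k:
--             result.append(False)
--         else:
--             result.append(True)
--             last_delivered[message] = timestamp
--
--     return result
-- ===== SOURCE B (Python) =====
-- from typing import List
--
-- def delivery_message(timestamps: List[int], messages: List[str], k: int) -> List[bool]: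
--     n = len(timestamps)
--     # Phase 1: group the occurrences of each message content, in order.
--     groups: dict[str, list[tuple[int, int]]] = {}
--     for i in range(n):
--         groups.setdefault(messages[i], []).append((i, timestamps[i]))
--     # Phase 2: decide each group independently and scatter into the result.
--     result = [False] * n
--     for occs in groups.values():
--         last = None
--         for idx, ts in occs:
--             if last is None or ts - last >= k:
--                 result[idx] = True
--                 last = ts
--     return result
-- ===== Notes on version B (the rewrite author's own statement) =====
-- stated objective: alternative
-- what changed: Replaces the single interleaved scan carrying a global last-delivered dict with a two-phase group-by: first bucket each message content's (index, timestamp) occurrences, then run each group independently with a scalar last-delivered and scatter booleans into a pre-sized result.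
import Mathlib
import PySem

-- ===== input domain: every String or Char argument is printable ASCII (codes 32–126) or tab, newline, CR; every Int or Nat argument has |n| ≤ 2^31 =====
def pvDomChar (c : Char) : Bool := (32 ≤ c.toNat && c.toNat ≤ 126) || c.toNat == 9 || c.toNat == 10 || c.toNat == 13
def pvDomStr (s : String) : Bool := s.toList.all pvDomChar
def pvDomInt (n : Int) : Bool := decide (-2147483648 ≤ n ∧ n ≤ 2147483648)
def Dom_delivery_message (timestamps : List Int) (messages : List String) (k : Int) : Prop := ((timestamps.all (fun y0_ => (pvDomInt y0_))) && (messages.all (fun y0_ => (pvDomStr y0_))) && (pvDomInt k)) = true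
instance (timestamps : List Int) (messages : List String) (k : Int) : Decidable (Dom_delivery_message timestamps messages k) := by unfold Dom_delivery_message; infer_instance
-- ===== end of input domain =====

-- B replaces A's single interleaved scan (global last-delivered dict) by a two-phase
-- group-by-content + per-group scatter: a genuinely different decomposition, same O(n) cost.


-- ===== PORT A =====
-- for i in range(len(timestamps)): index both lists; messages[i] may raise IndexError
-- (the `none` branch below is Python's IndexError; excluded by Pre_).
def delivery_message (timestamps : List Int) (messages : List String) (k : Int) : List Bool :=
  ((List.range timestamps.length).foldl
    (fun (st : List Bool × PySem.Dict String Int) i =>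
      match PySem.List.pyGet? timestamps (Int.ofNat i), PySem.List.pyGet? messages (Int.ofNat i) with
      | some timestamp, some message =>
        match st.2.get? message with
        | some last =>
          if timestamp - last < k then (st.1 ++ [false], st.2)
          else (st.1 ++ [true], st.2.insert message timestamp)
        | none => (st.1 ++ [true], st.2.insert message timestamp)
      | _, _ => st)
    ([], PySem.Dict.empty)).1

-- ===== PORT B =====
-- Phase 1 of Source B: groups.setdefault(messages[i], []).append((i, timestamps[i]));
-- messages[i] is read first and its `none` case is Python's IndexError (excluded by Pre_);
-- timestamps[i] never raises here (i < len(timestamps)), so pyGetD is exact for it.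
def pvGroupsB (timestamps : List Int) (messages : List String) :
    PySem.Dict String (List (Nat × Int)) :=
  (List.range timestamps.length).foldl
    (fun g i =>
      match PySem.List.pyGet? messages (Int.ofNat i) with
      | some m => g.modify m []
          (fun l : List (Nat × Int) => l ++ [(i, PySem.List.pyGetD timestamps (Int.ofNat i) 0)])
      | none => g)
    PySem.Dict.empty

-- Phase 2 of Source B: one scalar `last` per group, result[idx] = True on delivery.
def pvScatterB (k : Int) (st : List Bool × Option Int) (p : Nat × Int) : List Bool × Option Int :=
  match st.2 with
  | none => (st.1.set p.1 true, some p.2)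
  | some last => if k ≤ p.2 - last then (st.1.set p.1 true, some p.2) else st

def delivery_message_alt (timestamps : List Int) (messages : List String) (k : Int) : List Bool :=
  let groups := pvGroupsB timestamps messages
  groups.values.foldl
    (fun res occs => (occs.foldl (pvScatterB k) (res, none)).1)
    (List.replicate timestamps.length false)

-- ===== PRECONDITION & SPEC =====
-- Pre_ excludes exactly the inputs where both Pythons raise IndexError (messages shorter
-- than timestamps); A returns on every input satisfying Pre_.
def Pre_delivery_message (timestamps : List Int) (messages : List String) (k : Int) : Prop :=
  timestamps.length ≤ messages.length
instance (timestamps : List Int) (messages : List String) (k : Int) : Decidable (Pre_delivery_message timestamps messages k) := by unfold Pre_delivery_message; infer_instance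

def pvWitness_delivery_message : List Int × List String × Int := ([1, 5, 10, 11], ["a", "b", "a", "b"], 3)

def Spec_delivery_message (timestamps : List Int) (messages : List String) (k : Int) (out : List Bool) : Prop := out = delivery_message_alt timestamps messages k
instance (timestamps : List Int) (messages : List String) (k : Int) (out : List Bool) : Decidable (Spec_delivery_message timestamps messages k out) := by unfold Spec_delivery_message; infer_instance

-- ===== CLAIM (what is proved, stated in full; the proofs are below) =====
def Claim_equal_delivery_message : Prop := ∀ (timestamps : List Int) (messages : List String) (k : Int), Dom_delivery_message timestamps messages k → Pre_delivery_message timestamps messages k → Spec_delivery_message timestamps messages k (delivery_message timestamps messages k)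

-- ===== LEMMAS AND PROOFS =====

def decGrp (k : Int) : Option Int → List Int → List Bool
  | _, [] => []
  | none, t :: rest => true :: decGrp k (some t) rest
  | some l, t :: rest =>
    if t - l < k then false :: decGrp k (some l) rest
    else true :: decGrp k (some t) rest

def runA (k : Int) (d : PySem.Dict String Int) : List (Int × String) → List Bool
  | [] => []
  | (t, m) :: rest =>
    match d.get? m with
    | some last =>
      if t - last < k then false :: runA k d rest
      else true :: runA k (d.insert m t) rest
    | none => true :: runA k (d.insert m t) rest

theorem length_runA (k : Int) (d : PySem.Dict String Int) (L : List (Int × String)) :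
    (runA k d L).length = L.length := by
  induction L generalizing d with
  | nil => rfl
  | cons q rest ih =>
    obtain ⟨t, m⟩ := q
    simp only [runA]
    rcases hd : d.get? m with _ | last <;> simp only []
    · simp [ih]
    · split <;> simp [ih]

-- same conversion for port B's phase-1 loop (reads messages[i], then timestamps[i])
theorem foldIdxB {σ : Type} (f : σ → Nat → Int → String → σ) :
    ∀ (ts : List Int) (ms : List String) (s : Nat) (st : σ),
      ts.length ≤ ms.length →
      (List.range ts.length).foldl
        (fun st i => match ms[i]? with
          | some m => f st (s + i) (ts.getD i 0) m
          | none => st) st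
      = ((ts.zip ms).zipIdx s).foldl (fun st q => f st q.2 q.1.1 q.1.2) st := by
  intro ts
  induction ts with
  | nil => intro ms s st h; simp
  | cons t rest ih =>
    intro ms s st h
    cases ms with
    | nil => simp at h
    | cons m ms' =>
      simp only [List.length_cons, List.range_succ_eq_map, List.foldl_cons, List.foldl_map]
      simp only [List.getElem?_cons_zero, List.getD_cons_zero]
      have h' : rest.length ≤ ms'.length := by simpa using h
      have := ih ms' (s + 1) (f st (s + 0) t m) h'
      simp only [List.getElem?_cons_succ, List.getD_cons_succ]
      simp only [List.zip_cons_cons, List.zipIdx_cons, List.foldl_cons]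
      simp only [Nat.add_zero] at this ⊢
      rw [← this]
      apply PySem.List.foldl_congr_mem
      intro acc i _
      have e : s + i.succ = s + 1 + i := by omega
      rcases ms'[i]? with _ | m' <;> simp only [e]

theorem foldA (k : Int) :
    ∀ (L : List (Int × String)) (acc : List Bool) (d : PySem.Dict String Int),
      (L.foldl
        (fun (st : List Bool × PySem.Dict String Int) q =>
          match st.2.get? q.2 with
          | some last =>
            if q.1 - last < k then (st.1 ++ [false], st.2)
            else (st.1 ++ [true], st.2.insert q.2 q.1)
          | none => (st.1 ++ [true], st.2.insert q.2 q.1)) (acc, d)).1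
      = acc ++ runA k d L := by
  intro L
  induction L with
  | nil => intro acc d; simp [runA]
  | cons q rest ih =>
    intro acc d
    obtain ⟨t, m⟩ := q
    simp only [List.foldl_cons, runA]
    rcases hd : d.get? m with _ | last <;> simp only [hd]
    · rw [ih]; simp
    · split <;> (rw [ih]; simp)

theorem foldIdx {σ : Type} (f : σ → Nat → Int → String → σ) :
    ∀ (ts : List Int) (ms : List String) (s : Nat) (st : σ),
      ts.length ≤ ms.length →
      (List.range ts.length).foldl
        (fun st i => match ts[i]?, ms[i]? with
          | some t, some m => f st (s + i) t m
          | _, _ => st) st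
      = ((ts.zip ms).zipIdx s).foldl (fun st q => f st q.2 q.1.1 q.1.2) st := by
  intro ts
  induction ts with
  | nil => intro ms s st h; simp
  | cons t rest ih =>
    intro ms s st h
    cases ms with
    | nil => simp at h
    | cons m ms' =>
      simp only [List.length_cons, List.range_succ_eq_map, List.foldl_cons, List.foldl_map]
      simp only [List.getElem?_cons_zero]
      have h' : rest.length ≤ ms'.length := by simpa using h
      have := ih ms' (s + 1) (f st (s + 0) t m) h'
      simp only [List.getElem?_cons_succ]
      simp only [List.zip_cons_cons, List.zipIdx_cons, List.foldl_cons]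
      simp only [Nat.add_zero] at this ⊢
      rw [← this]
      apply PySem.List.foldl_congr_mem
      intro acc i _
      have e : s + i.succ = s + 1 + i := by omega
      rcases rest[i]? with _ | t' <;> rcases ms'[i]? with _ | m' <;> simp only [e]

theorem length_scat (k : Int) :
    ∀ (occs : List (Nat × Int)) (res : List Bool) (o : Option Int),
      ((occs.foldl (pvScatterB k) (res, o)).1).length = res.length := by
  intro occs
  induction occs with
  | nil => intro res o; rfl
  | cons p rest ih =>
    intro res o
    rw [List.foldl_cons]
    cases o with
    | none => rw [show pvScatterB k (res, none) p = (res.set p.1 true, some p.2) from rfl, ih]; simp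
    | some l =>
      by_cases hle : k ≤ p.2 - l
      · rw [show pvScatterB k (res, some l) p = (res.set p.1 true, some p.2) from by
          simp [pvScatterB, hle], ih]
        simp
      · rw [show pvScatterB k (res, some l) p = (res, some l) from by
          simp [pvScatterB, hle], ih]

theorem scat_skip (k : Int) (i : Nat) :
    ∀ (occs : List (Nat × Int)) (res : List Bool) (o : Option Int),
      (∀ p ∈ occs, p.1 ≠ i) →
      ((occs.foldl (pvScatterB k) (res, o)).1)[i]? = res[i]? := by
  intro occs
  induction occs with
  | nil => intro res o _; rfl
  | cons p rest ih =>
    intro res o h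
    have hp : p.1 ≠ i := h p (by simp)
    have h' : ∀ q ∈ rest, q.1 ≠ i := fun q hq => h q (by simp [hq])
    rw [List.foldl_cons]
    cases o with
    | none =>
      rw [show pvScatterB k (res, none) p = (res.set p.1 true, some p.2) from rfl, ih _ _ h']
      simp [List.getElem?_set, hp]
    | some l =>
      by_cases hle : k ≤ p.2 - l
      · rw [show pvScatterB k (res, some l) p = (res.set p.1 true, some p.2) from by
          simp [pvScatterB, hle], ih _ _ h']
        simp [List.getElem?_set, hp]
      · rw [show pvScatterB k (res, some l) p = (res, some l) from by
          simp [pvScatterB, hle], ih _ _ h']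

theorem scat_hit (k : Int) (i : Nat) :
    ∀ (pre post : List (Nat × Int)) (t : Int) (res : List Bool) (o : Option Int),
      (∀ p ∈ pre, p.1 ≠ i) → (∀ p ∈ post, p.1 ≠ i) →
      res[i]? = some false →
      (((pre ++ (i, t) :: post).foldl (pvScatterB k) (res, o)).1)[i]? =
        (decGrp k o ((pre ++ (i, t) :: post).map Prod.snd))[pre.length]? := by
  intro pre
  induction pre with
  | nil =>
    intro post t res o _ hpost hres
    have hlen : i < res.length := by
      rcases Nat.lt_or_ge i res.length with hh | hh
      · exact hh
      · rw [List.getElem?_eq_none (by omega)] at hres; cases hres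
    rw [List.nil_append, List.foldl_cons, List.map_cons]
    cases o with
    | none =>
      rw [show pvScatterB k (res, none) (i, t) = (res.set i true, some t) from rfl]
      rw [scat_skip k i post _ _ hpost]
      simp [decGrp, List.getElem?_set, hlen]
    | some l =>
      by_cases hle : k ≤ t - l
      · rw [show pvScatterB k (res, some l) (i, t) = (res.set i true, some t) from by
          simp [pvScatterB, hle]]
        rw [scat_skip k i post _ _ hpost]
        rw [show decGrp k (some l) (t :: List.map Prod.snd post)
            = true :: decGrp k (some t) (List.map Prod.snd post) from by
          simp [decGrp]; omega]
        simp [List.getElem?_set, hlen]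
      · rw [show pvScatterB k (res, some l) (i, t) = (res, some l) from by
          simp [pvScatterB, hle]]
        rw [scat_skip k i post _ _ hpost]
        rw [show decGrp k (some l) (t :: List.map Prod.snd post)
            = false :: decGrp k (some l) (List.map Prod.snd post) from by
          simp [decGrp]; omega]
        simpa using hres
  | cons q pre' ih =>
    intro post t res o hpre hpost hres
    have hq : q.1 ≠ i := hpre q (by simp)
    have hpre' : ∀ p ∈ pre', p.1 ≠ i := fun p hp => hpre p (by simp [hp])
    rw [List.cons_append, List.foldl_cons, List.map_cons, List.length_cons]
    cases o with
    | none =>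
      rw [show pvScatterB k (res, none) q = (res.set q.1 true, some q.2) from rfl]
      rw [show decGrp k none (q.2 :: List.map Prod.snd (pre' ++ (i, t) :: post))
          = true :: decGrp k (some q.2) (List.map Prod.snd (pre' ++ (i, t) :: post)) from rfl]
      rw [List.getElem?_cons_succ]
      exact ih post t _ _ hpre' hpost (by simp [List.getElem?_set, hq, hres])
    | some l =>
      by_cases hle : k ≤ q.2 - l
      · rw [show pvScatterB k (res, some l) q = (res.set q.1 true, some q.2) from by
          simp [pvScatterB, hle]]
        rw [show decGrp k (some l) (q.2 :: List.map Prod.snd (pre' ++ (i, t) :: post))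
            = true :: decGrp k (some q.2) (List.map Prod.snd (pre' ++ (i, t) :: post)) from by
          simp [decGrp]; omega]
        rw [List.getElem?_cons_succ]
        exact ih post t _ _ hpre' hpost (by simp [List.getElem?_set, hq, hres])
      · rw [show pvScatterB k (res, some l) q = (res, some l) from by
          simp [pvScatterB, hle]]
        rw [show decGrp k (some l) (q.2 :: List.map Prod.snd (pre' ++ (i, t) :: post))
            = false :: decGrp k (some l) (List.map Prod.snd (pre' ++ (i, t) :: post)) from by
          simp [decGrp]; omega]
        rw [List.getElem?_cons_succ]
        exact ih post t _ _ hpre' hpost hres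

def tsOf (m : String) (L : List (Int × String)) : List Int :=
  (L.filter (fun q => q.2 == m)).map Prod.fst

theorem runA_getElem? (k : Int) :
    ∀ (L : List (Int × String)) (d : PySem.Dict String Int) (i : Nat) (hi : i < L.length),
      (runA k d L)[i]? =
        (decGrp k (d.get? (L[i].2)) (tsOf (L[i].2) L))[((L.take i).map Prod.snd).count (L[i].2)]? := by
  intro L
  induction L with
  | nil => intro d i hi; simp at hi
  | cons q rest ih =>
    intro d i hi
    obtain ⟨t, m⟩ := q
    cases i with
    | zero =>
      simp only [List.getElem_cons_zero, List.take_zero, List.map_nil, List.count_nil]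
      have hts : tsOf m ((t, m) :: rest) = t :: tsOf m rest := by simp [tsOf]
      rw [hts]
      simp only [runA]
      rcases hd : d.get? m with _ | l
      · simp [decGrp]
      · simp only [decGrp]
        split <;> simp
    | succ i =>
      have hi' : i < rest.length := by simpa using hi
      simp only [List.getElem_cons_succ, List.take_succ_cons, List.map_cons]
      by_cases hmm : rest[i].2 = m
      · rw [hmm]
        have hts : tsOf m ((t, m) :: rest) = t :: tsOf m rest := by simp [tsOf]
        rw [hts]
        have hcnt : (m :: (rest.take i).map Prod.snd).count m
            = ((rest.take i).map Prod.snd).count m + 1 := by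
          simp [List.count_cons]
        rw [hcnt]
        simp only [runA]
        have ihm : ∀ d' : PySem.Dict String Int, (runA k d' rest)[i]? =
            (decGrp k (d'.get? m) (tsOf m rest))[((rest.take i).map Prod.snd).count m]? := by
          intro d'
          have := ih d' i hi'
          rw [hmm] at this
          exact this
        rcases hd : d.get? m with _ | l <;> simp only []
        · simp only [decGrp, List.getElem?_cons_succ]
          rw [ihm (d.insert m t), PySem.Dict.get?_insert_self d m t]
        · simp only [decGrp]
          rcases lt_or_ge (t - l) k with hlt | hge
          · rw [if_pos hlt, if_pos hlt]
            simp only [List.getElem?_cons_succ]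
            rw [ihm d, hd]
          · rw [if_neg (by omega), if_neg (by omega)]
            simp only [List.getElem?_cons_succ]
            rw [ihm (d.insert m t), PySem.Dict.get?_insert_self d m t]
      · have hts : tsOf rest[i].2 ((t, m) :: rest) = tsOf rest[i].2 rest := by
          simp [tsOf, List.filter_cons, (by simpa using Ne.symm hmm : (m == rest[i].2) = false)]
        rw [hts]
        have hcnt : (m :: (rest.take i).map Prod.snd).count rest[i].2
            = ((rest.take i).map Prod.snd).count rest[i].2 := by
          rw [List.count_cons]
          simp [hmm, Ne.symm hmm]
        rw [hcnt]
        simp only [runA]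
        rcases hd : d.get? m with _ | l <;> simp only []
        · simp only [List.getElem?_cons_succ]
          rw [ih (d.insert m t) i hi',
            PySem.Dict.get?_insert_of_ne d t hmm]
        · rcases lt_or_ge (t - l) k with hlt | hge
          · rw [if_pos hlt]
            simp only [List.getElem?_cons_succ]
            rw [ih d i hi']
          · rw [if_neg (by omega)]
            simp only [List.getElem?_cons_succ]
            rw [ih (d.insert m t) i hi',
              PySem.Dict.get?_insert_of_ne d t hmm]

def occOf (m : String) (E : List ((Int × String) × Nat)) : List (Nat × Int) :=
  (E.filter (fun q => q.1.2 == m)).map (fun q => (q.2, q.1.1))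

theorem occ_snd (m : String) :
    ∀ (L : List (Int × String)) (s : Nat),
      (occOf m (L.zipIdx s)).map Prod.snd = tsOf m L := by
  intro L
  induction L with
  | nil => intro s; rfl
  | cons q rest ih =>
    intro s
    have ih' := ih (s + 1)
    simp only [occOf, tsOf] at ih'
    by_cases h : q.2 = m
    · simp only [occOf, tsOf, List.zipIdx_cons, List.filter_cons]
      simp [h, ih']
    · simp only [occOf, tsOf, List.zipIdx_cons, List.filter_cons]
      simp [h, ih']

theorem occ_len (m : String) (L : List (Int × String)) (s : Nat) :
    (occOf m (L.zipIdx s)).length = (L.map Prod.snd).count m := by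
  have h1 : (occOf m (L.zipIdx s)).length = (tsOf m L).length := by
    rw [← occ_snd m L s, List.length_map]
  rw [h1, tsOf, List.length_map, List.count_eq_countP, List.countP_map]
  rw [← List.countP_eq_length_filter]
  rfl

theorem occ_idx_mem (m : String) (L : List (Int × String)) (s : Nat) (p : Nat × Int)
    (hp : p ∈ occOf m (L.zipIdx s)) :
    s ≤ p.1 ∧ p.1 < s + L.length ∧ L[p.1 - s]? = some (p.2, m) := by
  simp only [occOf, List.mem_map, List.mem_filter] at hp
  obtain ⟨q, ⟨hqE, hqm⟩, hpq⟩ := hp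
  obtain ⟨h1, h2, h3⟩ := List.mem_zipIdx (x := q.1) (i := q.2) (by simpa using hqE)
  subst hpq
  refine ⟨h1, by omega, ?_⟩
  rw [List.getElem?_eq_getElem (by omega)]
  have : q.1 = (q.1.1, q.1.2) := rfl
  rw [← h3, this]
  simp [eq_of_beq hqm]

theorem occ_append (m : String) (E F : List ((Int × String) × Nat)) :
    occOf m (E ++ F) = occOf m E ++ occOf m F := by
  simp [occOf]

theorem occ_decomp (m : String) (L : List (Int × String)) (i : Nat) (hi : i < L.length)
    (hm : L[i].2 = m) :
    L.zipIdx = (L.take i).zipIdx ++ ((L[i], i) :: (L.drop (i + 1)).zipIdx (i + 1)) := by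
  conv_lhs => rw [← List.take_append_drop i L]
  rw [List.zipIdx_append, List.drop_eq_getElem_cons hi, List.zipIdx_cons]
  have hl : (L.take i).length = i := List.length_take_of_le (by omega)
  rw [hl]
  simp [Nat.add_comm]

theorem scatAll_len (k : Int) (g : String → List (Nat × Int)) :
    ∀ (Ms : List String) (res : List Bool),
      (Ms.foldl (fun res m' => ((g m').foldl (pvScatterB k) (res, none)).1) res).length
        = res.length := by
  intro Ms
  induction Ms with
  | nil => intro res; rfl
  | cons m' rest ih => intro res; rw [List.foldl_cons, ih, length_scat]

theorem scatAll_skip (k : Int) (g : String → List (Nat × Int)) (i : Nat) :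
    ∀ (Ms : List String) (res : List Bool),
      (∀ m' ∈ Ms, ∀ p ∈ g m', p.1 ≠ i) →
      (Ms.foldl (fun res m' => ((g m').foldl (pvScatterB k) (res, none)).1) res)[i]?
        = res[i]? := by
  intro Ms
  induction Ms with
  | nil => intro res _; rfl
  | cons m' rest ih =>
    intro res h
    rw [List.foldl_cons, ih _ (fun x hx => h x (by simp [hx])),
      scat_skip k i _ _ _ (h m' (by simp))]

theorem main_eq (timestamps : List Int) (messages : List String) (k : Int)
    (h : timestamps.length ≤ messages.length) :
    delivery_message timestamps messages k = delivery_message_alt timestamps messages k := by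
  have hL : (timestamps.zip messages).length = timestamps.length := by
    rw [List.length_zip]; omega
  -- A side: the range fold is runA over the zipped sequence
  have hA : delivery_message timestamps messages k
      = runA k PySem.Dict.empty (timestamps.zip messages) := by
    unfold delivery_message
    simp only [Int.ofNat_eq_natCast, PySem.List.pyGet?_natCast]
    have e1 := foldIdx (σ := List Bool × PySem.Dict String Int)
      (fun st _ t m =>
        match st.2.get? m with
        | some last =>
          if t - last < k then (st.1 ++ [false], st.2)
          else (st.1 ++ [true], st.2.insert m t)
        | none => (st.1 ++ [true], st.2.insert m t))
      timestamps messages 0 ([], PySem.Dict.empty) h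
    beta_reduce at e1
    rw [e1]
    rw [(List.foldl_map (f := @Prod.fst (Int × String) Nat)
      (g := fun (st : List Bool × PySem.Dict String Int) (q : Int × String) =>
        match st.2.get? q.2 with
        | some last =>
          if q.1 - last < k then (st.1 ++ [false], st.2)
          else (st.1 ++ [true], st.2.insert q.2 q.1)
        | none => (st.1 ++ [true], st.2.insert q.2 q.1))
      (l := (timestamps.zip messages).zipIdx 0)
      (init := (([] : List Bool), (PySem.Dict.empty : PySem.Dict String Int)))).symm]
    rw [List.zipIdx_map_fst, foldA, List.nil_append]
  -- B side: groups/values/scatter normal form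
  have hB : delivery_message_alt timestamps messages k
      = (PySem.Set.ofList ((timestamps.zip messages).map Prod.snd)).foldl
          (fun res m' =>
            ((occOf m' ((timestamps.zip messages).zipIdx 0)).foldl
              (pvScatterB k) (res, none)).1)
          (List.replicate timestamps.length false) := by
    unfold delivery_message_alt pvGroupsB
    simp only [Int.ofNat_eq_natCast, PySem.List.pyGet?_natCast, PySem.List.pyGetD_natCast]
    have e1 := foldIdxB (σ := PySem.Dict String (List (Nat × Int)))
      (fun g i t m => g.modify m [] (fun l : List (Nat × Int) => l ++ [(i, t)]))
      timestamps messages 0 PySem.Dict.empty h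
    beta_reduce at e1
    simp only [Nat.zero_add] at e1
    rw [e1]
    rw [(List.foldl_map (f := fun (q : (Int × String) × Nat) => (q.1.2, (q.2, q.1.1)))
      (g := fun (g : PySem.Dict String (List (Nat × Int))) (p : String × (Nat × Int)) =>
        g.modify p.1 [] (fun l : List (Nat × Int) => l ++ [p.2]))
      (l := (timestamps.zip messages).zipIdx 0)
      (init := (PySem.Dict.empty : PySem.Dict String (List (Nat × Int))))).symm]
    set E' := ((timestamps.zip messages).zipIdx 0).map
      (fun (q : (Int × String) × Nat) => (q.1.2, (q.2, q.1.1))) with hE'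
    set groups := E'.foldl
      (fun (g : PySem.Dict String (List (Nat × Int))) p =>
        g.modify p.1 [] (fun l : List (Nat × Int) => l ++ [p.2]))
      PySem.Dict.empty with hgroups
    have hnd : groups.keys.Nodup := by
      have := PySem.Dict.nodup_keys_foldl_modify_key E' Prod.fst []
        (fun _ p => (fun l : List (Nat × Int) => l ++ [p.2])) PySem.Dict.empty
        (by simp [PySem.Dict.nodup_keys_empty])
      simpa using this
    have hkeys : groups.keys = PySem.Set.ofList ((timestamps.zip messages).map Prod.snd) := by
      have := PySem.Dict.keys_foldl_modify_key E' Prod.fst []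
        (fun _ p => (fun l : List (Nat × Int) => l ++ [p.2])) PySem.Dict.empty
      simp only [PySem.Dict.keys_empty] at this
      rw [hgroups]
      have h2 : E'.map Prod.fst = (timestamps.zip messages).map Prod.snd := by
        rw [hE', List.map_map]
        rw [show (Prod.fst ∘ (fun (q : (Int × String) × Nat) => (q.1.2, (q.2, q.1.1))))
            = Prod.snd ∘ Prod.fst from rfl]
        rw [← List.map_map, List.zipIdx_map_fst]
      rw [← h2]
      simpa using this
    have hgetD : ∀ m', groups.getD m' []
        = occOf m' ((timestamps.zip messages).zipIdx 0) := by
      intro m'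
      have := PySem.Dict.getD_foldl_modify_append E' PySem.Dict.empty m'
      rw [hgroups]
      rw [this]
      rw [PySem.Dict.getD_empty, List.nil_append, hE', List.filter_map, List.map_map]
      rfl
    rw [PySem.Dict.values_eq_map_keys groups hnd [], List.foldl_map, hkeys]
    apply PySem.List.foldl_congr_mem
    intro res m' _
    rw [hgetD m']
  rw [hA, hB]
  apply List.ext_getElem?
  intro i
  by_cases hi : i < timestamps.length
  · have hi' : i < (timestamps.zip messages).length := by omega
    have hAi := runA_getElem? k (timestamps.zip messages) PySem.Dict.empty i hi'
    rw [PySem.Dict.get?_empty] at hAi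
    rw [hAi]
    have hmem : (timestamps.zip messages)[i].2
        ∈ PySem.Set.ofList ((timestamps.zip messages).map Prod.snd) := by
      rw [PySem.Set.mem_ofList]
      exact List.mem_map.mpr ⟨(timestamps.zip messages)[i],
        (timestamps.zip messages).getElem_mem hi', rfl⟩
    have hnd : (PySem.Set.ofList ((timestamps.zip messages).map Prod.snd)).Nodup :=
      PySem.Set.nodup_ofList _
    obtain ⟨M₁, M₂, hsplit⟩ := List.mem_iff_append.mp hmem
    rw [hsplit] at hnd
    have hnd' := List.nodup_append.mp hnd
    have nm1 : (timestamps.zip messages)[i].2 ∉ M₁ := by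
      intro hmm
      exact hnd'.2.2 _ hmm _ (by simp) rfl
    have nm2 : (timestamps.zip messages)[i].2 ∉ M₂ := (List.nodup_cons.mp hnd'.2.1).1
    have hforeign : ∀ m', m' ≠ (timestamps.zip messages)[i].2 →
        ∀ p ∈ occOf m' ((timestamps.zip messages).zipIdx 0), p.1 ≠ i := by
      intro m' hne p hp hpi
      obtain ⟨-, -, hget⟩ := occ_idx_mem m' (timestamps.zip messages) 0 p hp
      rw [hpi] at hget
      simp only [Nat.sub_zero] at hget
      rw [List.getElem?_eq_getElem hi', Option.some_inj] at hget
      exact hne (by rw [hget])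
    rw [hsplit, List.foldl_append, List.foldl_cons]
    rw [scatAll_skip k (fun m' => occOf m' ((timestamps.zip messages).zipIdx 0)) i M₂ _
      (fun m' hm' p hp => hforeign m' (fun e => nm2 (e ▸ hm')) p hp)]
    have hres1 : (M₁.foldl
        (fun res m' => ((occOf m' ((timestamps.zip messages).zipIdx 0)).foldl
          (pvScatterB k) (res, none)).1)
        (List.replicate timestamps.length false))[i]? = some false := by
      rw [scatAll_skip k (fun m' => occOf m' ((timestamps.zip messages).zipIdx 0)) i M₁ _
        (fun m' hm' p hp => hforeign m' (fun e => nm1 (e ▸ hm')) p hp)]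
      simp [hi]
    have hde := occ_decomp ((timestamps.zip messages)[i].2) (timestamps.zip messages) i hi' rfl
    have hcons : occOf ((timestamps.zip messages)[i].2)
          (((timestamps.zip messages)[i], i)
            :: ((timestamps.zip messages).drop (i + 1)).zipIdx (i + 1))
        = (i, (timestamps.zip messages)[i].1)
          :: occOf ((timestamps.zip messages)[i].2)
            (((timestamps.zip messages).drop (i + 1)).zipIdx (i + 1)) := by
      simp [occOf, List.filter_cons]
    have hocc : occOf ((timestamps.zip messages)[i].2) ((timestamps.zip messages).zipIdx 0)
        = occOf ((timestamps.zip messages)[i].2) (((timestamps.zip messages).take i).zipIdx 0)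
          ++ ((i, (timestamps.zip messages)[i].1)
            :: occOf ((timestamps.zip messages)[i].2)
              (((timestamps.zip messages).drop (i + 1)).zipIdx (i + 1))) := by
      rw [hde, occ_append, hcons]
    have hpre : ∀ p ∈ occOf ((timestamps.zip messages)[i].2)
        (((timestamps.zip messages).take i).zipIdx 0), p.1 ≠ i := by
      intro p hp
      obtain ⟨-, hlt, -⟩ := occ_idx_mem _ _ _ p hp
      have : ((timestamps.zip messages).take i).length ≤ i := by
        simp [List.length_take]
      omega
    have hpost : ∀ p ∈ occOf ((timestamps.zip messages)[i].2)
        (((timestamps.zip messages).drop (i + 1)).zipIdx (i + 1)), p.1 ≠ i := by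
      intro p hp
      obtain ⟨hge, -, -⟩ := occ_idx_mem _ _ _ p hp
      omega
    rw [hocc, scat_hit k i _ _ _ _ none hpre hpost hres1]
    rw [← hcons, ← occ_append, ← hde, occ_snd, occ_len]
  · have hlenA : (runA k PySem.Dict.empty (timestamps.zip messages)).length
        = timestamps.length := by rw [length_runA, hL]
    have hlenB := scatAll_len k
      (fun m' => occOf m' ((timestamps.zip messages).zipIdx 0))
      (PySem.Set.ofList ((timestamps.zip messages).map Prod.snd))
      (List.replicate timestamps.length false)
    rw [List.getElem?_eq_none (by omega),
      List.getElem?_eq_none (le_of_eq_of_le (by simpa using hlenB) (by omega))]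

-- ===== VERDICT (by name: the statement is the Claim_ definition above) =====
theorem delivery_message_spec : Claim_equal_delivery_message := by
  intro ts ms k _ hpre
  unfold Spec_delivery_message
  exact main_eq ts ms k hpre
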